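-- pv_equiv track=rewrite | github.com/yishmo/PairingsHaveBeenPosted | ygotournament.py | players_to_seats
-- ===== SOURCE A (Python) =====
-- def players_to_seats(players):
--     seats = []
--     for i in range(0, len(players), 2):
--         try:
--             seats.append([players[i], players[i+1]])
--         except IndexError:
--             seats.append([players[i], "BYE"])
--
--     return seats
-- ===== SOURCE B (Python) =====
-- def players_to_seats(players):
--     it = iter(players)
--     return [[a, next(it, "BYE")] for a in it]
-- ===== Notes on version B (the rewrite author's own statement) =====
-- stated objective: idiomatic
-- what changed: Replaces the index-stepping range(0,len,2) loop with try/except IndexError by a single pass that pairs consecutive elements from one iterator (next(it, "BYE") supplies the pad), ported as a two-step structural recursion.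
import Mathlib
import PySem

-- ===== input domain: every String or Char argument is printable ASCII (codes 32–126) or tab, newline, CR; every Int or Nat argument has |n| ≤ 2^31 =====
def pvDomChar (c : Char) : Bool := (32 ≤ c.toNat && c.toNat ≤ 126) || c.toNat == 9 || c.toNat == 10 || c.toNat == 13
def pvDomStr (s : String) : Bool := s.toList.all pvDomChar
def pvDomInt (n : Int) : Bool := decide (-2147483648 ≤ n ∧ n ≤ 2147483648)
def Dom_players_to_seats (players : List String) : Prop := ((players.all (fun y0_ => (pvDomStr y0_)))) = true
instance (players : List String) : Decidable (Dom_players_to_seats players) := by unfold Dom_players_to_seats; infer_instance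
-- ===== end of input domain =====

-- B pairs consecutive players from a single iterator (BYE pad) instead of A's index-stepping loop with try/except; same O(n) cost, plainer code.

-- ===== PORT A =====
-- for i in range(0, len(players), 2): try append [players[i], players[i+1]] except IndexError append [players[i], "BYE"].
-- players[i] is always in range (i ∈ range(0, len)); the none case for it is unreachable and leaves seats unchanged.
def players_to_seats (players : List String) : List (List String) :=
  (PySem.List.pyRange 0 players.length 2).foldl
    (fun seats i =>
      match PySem.List.pyGet? players i, PySem.List.pyGet? players (i + 1) with
      | some a, some b => seats ++ [[a, b]]
      | some a, none   => seats ++ [[a, "BYE"]]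
      | none,   _      => seats)
    []

-- ===== PORT B =====
-- Source B: each comprehension step pulls one element a from the iterator, then next(it, "BYE") pulls its partner:
-- a two-step structural recursion over the list.
def players_to_seats_alt : List String → List (List String)
  | [] => []
  | [a] => [[a, "BYE"]]
  | a :: b :: rest => [a, b] :: players_to_seats_alt rest

-- ===== PRECONDITION & SPEC =====
def Spec_players_to_seats (players : List String) (out : List (List String)) : Prop := out = players_to_seats_alt players
instance (players : List String) (out : List (List String)) : Decidable (Spec_players_to_seats players out) := by unfold Spec_players_to_seats; infer_instance

-- ===== CLAIM (what is proved, stated in full; the proofs are below) =====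
def Claim_equal_players_to_seats : Prop := ∀ (players : List String), Dom_players_to_seats players → Spec_players_to_seats players (players_to_seats players)

-- ===== LEMMAS AND PROOFS =====

-- A's loop body at step index 2*k, written with Nat indices
def pvStep (players : List String) (k : Nat) : List (List String) :=
  match players[2 * k]?, players[2 * k + 1]? with
  | some a, some b => [[a, b]]
  | some a, none   => [[a, "BYE"]]
  | none,   _      => []

theorem pvRange02 (n : Nat) :
    PySem.List.pyRange 0 (n : Int) 2 = (List.range ((n + 1) / 2)).map (fun (k : Nat) => ((2 * k : Nat) : Int)) := by
  unfold PySem.List.pyRange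
  norm_num
  have hc : (if 0 < n then (((n : Int) + 2 - 1) / 2).toNat else 0) = (n + 1) / 2 := by
    split <;> omega
  rw [hc]

theorem pvGetShift (a b : String) (rest : List String) (k : Nat) :
    pvStep (a :: b :: rest) (k + 1) = pvStep rest k := by
  unfold pvStep
  have h1 : (a :: b :: rest)[2 * (k + 1)]? = rest[2 * k]? := by
    have h : 2 * (k + 1) = 2 * k + 1 + 1 := by ring
    rw [h]; simp
  have h2 : (a :: b :: rest)[2 * (k + 1) + 1]? = rest[2 * k + 1]? := by
    have h : 2 * (k + 1) + 1 = 2 * k + 1 + 1 + 1 := by ring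
    rw [h]; simp
  rw [h1, h2]

theorem pvStepCast (players : List String) (k : Nat) :
    (match PySem.List.pyGet? players ((2 * k : Nat) : Int),
           PySem.List.pyGet? players (((2 * k : Nat) : Int) + 1) with
      | some a, some b => [[a, b]]
      | some a, none   => [[a, "BYE"]]
      | none,   _      => ([] : List (List String))) = pvStep players k := by
  unfold pvStep
  have e2 : ((2 * k : Nat) : Int) + 1 = ((2 * k + 1 : Nat) : Int) := by push_cast; ring
  rw [e2, PySem.List.pyGet?_natCast, PySem.List.pyGet?_natCast]

theorem pvMain (players : List String) :
    (List.range ((players.length + 1) / 2)).flatMap (fun k => pvStep players k)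
      = players_to_seats_alt players := by
  induction players using players_to_seats_alt.induct with
  | case1 => simp [players_to_seats_alt]
  | case2 a => simp [players_to_seats_alt, pvStep]
  | case3 a b rest ih =>
    have hl : ((a :: b :: rest).length + 1) / 2 = ((rest.length + 1) / 2) + 1 := by
      simp [List.length_cons]; omega
    rw [hl, List.range_succ_eq_map, players_to_seats_alt]
    simp only [List.flatMap_cons, List.flatMap_map]
    have hstep0 : pvStep (a :: b :: rest) 0 = [[a, b]] := by simp [pvStep]
    rw [hstep0]
    have : ∀ k, pvStep (a :: b :: rest) (k + 1) = pvStep rest k := pvGetShift a b rest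
    simp only [Nat.succ_eq_add_one, this]
    simp [← ih, List.flatMap]

-- ===== VERDICT (by name: the statement is the Claim_ definition above) =====
theorem players_to_seats_spec : Claim_equal_players_to_seats := by
  intro players _
  unfold Spec_players_to_seats players_to_seats
  rw [pvRange02, List.foldl_map]
  have hb : (fun (x : List (List String)) (y : Nat) =>
      match PySem.List.pyGet? players ((2 * y : Nat) : Int),
            PySem.List.pyGet? players (((2 * y : Nat) : Int) + 1) with
      | some a, some b => x ++ [[a, b]]
      | some a, none   => x ++ [[a, "BYE"]]
      | none,   _      => x)
      = fun x y => x ++ pvStep players y := by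
    funext x y
    rw [← pvStepCast players y]
    rcases PySem.List.pyGet? players ((2 * y : Nat) : Int) with _ | a <;>
      rcases PySem.List.pyGet? players (((2 * y : Nat) : Int) + 1) with _ | b <;> simp
  rw [hb, PySem.List.foldl_append_eq_flatMap, List.nil_append, pvMain]
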